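-- pv_equiv track=rewrite | github.com/JuliaGast/counttrucola_submission | rule_based/learn_input_creator.py | get_c_rule_scores_x_multi
-- ===== SOURCE A (Python) =====
-- def get_c_rule_scores_x_multi(dataset, body_t, head_ts, head_exists_t, show, neg_minus1, x, WINDOW_SIZE):
--     """
--     helper function for extend_learn_input_constants_multi
--
--     This function collects the examples for a single entity that has been used as x substitution in the current rule.
--     Some of the parameters are lists some are sets.  Lists are always ordered.
--
--     :param body_t: A list of time steps for which the body of the rule is true for that specific x.
--     :param head_ts: A set of time steps for which the head of the rule is true for that specific x.
--     :param head_exists_t: A list of time steps for which something is stated w.r.t to x and the head relation of the rule.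
--     :param show: If set to True some debugging prints are created. Not used in normal mode.
--     :param neg_minus1: If this is true a negated atom is added to the body, if h(X,c, t) is the head, then !h(X,c, t-1) is the additional body atom.
--     :param x: The x entity for which data is collected (used for debugging prupose only).
--     :param WINDOW_SIZE: See options parameter named LEARN_WINDOW_SIZE
--     :return predictions: delta_t1 : (true predictions, all predictions),  delta_t2 : (true predictions, all predictions), ... }
--     """
--     # some lines are left for debugging purpose which create prints when show is set to True
--     index_b = 0
--     index_h = 0
--     predictions = {}
--     example_counter = 0
--     while index_h < len(head_exists_t) and head_exists_t[index_h] <= body_t[index_b]: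
--         index_h += 1
--     while index_b < len(body_t):
--         bt_current = body_t[index_b]
--         bt_next =  body_t[index_b+1] if index_b+1 < len(body_t) else 10000000 # hope thats high enough, horrible coding ...
--         while index_h < len(head_exists_t) and head_exists_t[index_h] <= bt_next:
--             ht = head_exists_t[index_h]
--             # everthing fine in bt_current and ht
--             delta = ht - bt_current
--             if delta < WINDOW_SIZE and (not(neg_minus1) or not(ht-1 in head_ts)):
--                 distances = get_distances_in_window(ht, body_t[:index_b+1], WINDOW_SIZE)
--                 tdistances = tuple(distances)
--                 if not tdistances in predictions:
--                     predictions[tdistances] = [0,0]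
--                 if ht in head_ts: predictions[tdistances][0] += 1
--                 predictions[tdistances][1] += 1
--                 example_counter += 1
--             index_h += 1
--         if index_h == len(head_exists_t): break
--         index_b += 1
--     return (predictions, example_counter)
--
-- def get_distances_in_window(t, ts_b, window_size):
--     """
--     t is the max timestep - the timesteps should be smaller than this one to be added
--     ts_b is a list of timesteps. we check which of them is in window
--     window_size is the size of the window
--     """
--     # TODO speed up this method by adding a binary search to find the index of the highes tb in ts_b which is smaller than t
--     # go back from this index until you are out of the window_size
--     distances = []
--     for tb in ts_b:
--         if t > tb:
--             if t - tb < window_size or window_size <= 0: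
--                 distances.append(t - tb)
--     return distances
-- ===== SOURCE B (Python) =====
-- def get_c_rule_scores_x_multi(dataset, body_t, head_ts, head_exists_t, show, neg_minus1, x, WINDOW_SIZE):
--     """Two-stage variant: first cut the head timeline into consecutive runs
--     bounded by the body timestamps, then aggregate each run against its growing
--     body prefix."""
--     predictions = {}
--     example_counter = 0
--     if not body_t:
--         return predictions, example_counter
--     MAX_T = 10000000  # closes the open-ended final run; dataset timestamps stay below it
--     heads = set(head_ts)
--     # stage 1: cut head_exists_t into consecutive runs, one per boundary;
--     # run 0 (timestamps not above body_t[0]) has no body context and is discarded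
--     runs = []
--     rest = head_exists_t
--     for bound in body_t + [MAX_T]:
--         run, rest = _cut(rest, bound)
--         runs.append(run)
--     # stage 2: each head in run i+1 is scored against the body prefix body_t[:i+1]
--     prefix = []
--     for bt, run in zip(body_t, runs[1:]):
--         prefix.append(bt)
--         for ht in run:
--             if ht - bt < WINDOW_SIZE and (not neg_minus1 or (ht - 1) not in heads):
--                 key = tuple(ht - tb for tb in prefix
--                             if tb < ht and (ht - tb < WINDOW_SIZE or WINDOW_SIZE <= 0))
--                 entry = predictions.setdefault(key, [0, 0])
--                 if ht in heads:
--                     entry[0] += 1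
--                 entry[1] += 1
--                 example_counter += 1
--     return predictions, example_counter
--
-- def _cut(rest, bound):
--     """Longest prefix of rest whose values do not exceed bound, plus the remainder."""
--     run = []
--     for v in rest:
--         if v > bound:
--             break
--         run.append(v)
--     return run, rest[len(run):]
-- ===== Notes on version B (the rewrite author's own statement) =====
-- stated objective: alternative
-- what changed: Replaces A's fused two-index nested while loops with a distance helper and manual dict-entry init by two explicit stages: stage 1 cuts head_exists_t into consecutive runs bounded by the body timestamps, stage 2 scores each run against its growing body prefix using a head set and dict.setdefault.
import Mathlib
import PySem

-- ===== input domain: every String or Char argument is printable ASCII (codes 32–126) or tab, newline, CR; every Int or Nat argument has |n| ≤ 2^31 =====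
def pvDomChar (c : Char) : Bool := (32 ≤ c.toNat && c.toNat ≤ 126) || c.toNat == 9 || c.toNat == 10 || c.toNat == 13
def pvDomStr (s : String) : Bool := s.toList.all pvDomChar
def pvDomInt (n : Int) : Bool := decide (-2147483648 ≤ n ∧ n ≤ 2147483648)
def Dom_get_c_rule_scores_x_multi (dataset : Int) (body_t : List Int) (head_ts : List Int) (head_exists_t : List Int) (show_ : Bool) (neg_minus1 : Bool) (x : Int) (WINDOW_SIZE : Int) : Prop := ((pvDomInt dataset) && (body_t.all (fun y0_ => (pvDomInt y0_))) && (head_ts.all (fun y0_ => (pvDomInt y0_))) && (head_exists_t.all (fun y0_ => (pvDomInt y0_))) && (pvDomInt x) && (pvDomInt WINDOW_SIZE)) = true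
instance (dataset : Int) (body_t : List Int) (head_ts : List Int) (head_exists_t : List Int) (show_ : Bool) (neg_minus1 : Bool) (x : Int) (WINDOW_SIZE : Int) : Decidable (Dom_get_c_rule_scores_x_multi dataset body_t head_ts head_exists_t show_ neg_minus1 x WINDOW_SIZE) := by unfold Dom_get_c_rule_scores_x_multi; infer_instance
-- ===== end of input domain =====

-- B restructures A's fused two-index nested while loops into two explicit stages (cut the head
-- timeline into runs bounded by the body timestamps, then score each run against its growing
-- body prefix); objective: alternative decomposition, same cost, same return value.

-- ===== PORT A =====

-- helper get_distances_in_window: loop appending t - tb under the two nested ifs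
def get_distances_in_window (t : Int) (ts_b : List Int) (window_size : Int) : List Int :=
  ts_b.foldl (fun distances tb =>
    if t > tb then
      if t - tb < window_size ∨ window_size ≤ 0 then distances ++ [t - tb] else distances
    else distances) []

-- first while loop: skip leading head timestamps ≤ body_t[0]
def pvASkip (head_exists_t : List Int) (b0 : Int) (index_h : Nat) : Nat :=
  if h : index_h < head_exists_t.length ∧ head_exists_t.getD index_h 0 ≤ b0 then
    pvASkip head_exists_t b0 (index_h + 1)
  else index_h
termination_by head_exists_t.length - index_h
decreasing_by omega

-- inner while loop over index_h (state: index_h, predictions, example_counter)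
def pvAInner (head_exists_t head_ts body_t : List Int) (neg_minus1 : Bool) (W : Int)
    (bt_current bt_next : Int) (index_b index_h : Nat)
    (predictions : PySem.Dict (List Int) (List Int)) (cnt : Int) :
    Nat × PySem.Dict (List Int) (List Int) × Int :=
  if h : index_h < head_exists_t.length ∧ head_exists_t.getD index_h 0 ≤ bt_next then
    let ht := head_exists_t.getD index_h 0
    let delta := ht - bt_current
    let st :=
      if delta < W ∧ (¬ (neg_minus1 = true) ∨ ¬ (head_ts.contains (ht - 1) = true)) then
        let distances := get_distances_in_window ht (body_t.take (index_b + 1)) W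
        let p := if ¬ (predictions.contains distances = true)
                 then predictions.insert distances [0, 0] else predictions
        let p := if head_ts.contains ht
                 then p.modify distances [0, 0] (fun v => v.set 0 (v.getD 0 0 + 1)) else p
        let p := p.modify distances [0, 0] (fun v => v.set 1 (v.getD 1 0 + 1))
        (p, cnt + 1)
      else (predictions, cnt)
    pvAInner head_exists_t head_ts body_t neg_minus1 W bt_current bt_next index_b (index_h + 1) st.1 st.2
  else (index_h, predictions, cnt)
termination_by head_exists_t.length - index_h
decreasing_by omega

-- outer while loop over index_b
def pvAOuter (head_exists_t head_ts body_t : List Int) (neg_minus1 : Bool) (W : Int)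
    (index_b index_h : Nat)
    (predictions : PySem.Dict (List Int) (List Int)) (cnt : Int) :
    PySem.Dict (List Int) (List Int) × Int :=
  if h : index_b < body_t.length then
    let bt_current := body_t.getD index_b 0
    let bt_next := if index_b + 1 < body_t.length then body_t.getD (index_b + 1) 0 else 10000000
    let r := pvAInner head_exists_t head_ts body_t neg_minus1 W bt_current bt_next index_b index_h predictions cnt
    if r.1 = head_exists_t.length then (r.2.1, r.2.2)
    else pvAOuter head_exists_t head_ts body_t neg_minus1 W (index_b + 1) r.1 r.2.1 r.2.2
  else (predictions, cnt)
termination_by body_t.length - index_b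
decreasing_by omega

-- body_t.getD 0 0 : Python evaluates body_t[0] only when head_exists_t ≠ []; Pre_ excludes body_t = [] ∧ head_exists_t ≠ [] (IndexError)
def get_c_rule_scores_x_multi (dataset : Int) (body_t : List Int) (head_ts : List Int) (head_exists_t : List Int) (show_ : Bool) (neg_minus1 : Bool) (x : Int) (WINDOW_SIZE : Int) : (List (List Int × List Int)) × Int :=
  let index_h := pvASkip head_exists_t (body_t.getD 0 0) 0
  let r := pvAOuter head_exists_t head_ts body_t neg_minus1 WINDOW_SIZE 0 index_h (PySem.Dict.mk []) 0
  (r.1.items, r.2)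

-- ===== PORT B =====

-- helper _cut: longest prefix of rest with values ≤ bound, plus the remainder
def pvCut : List Int → Int → List Int × List Int
  | [], _ => ([], [])
  | v :: vs, bound =>
    if bound < v then ([], v :: vs)
    else
      let r := pvCut vs bound
      (v :: r.1, r.2)

-- stage 1: 'for bound in body_t + [MAX_T]: run, rest = _cut(rest, bound); runs.append(run)'
def pvRunsFold (boundaries : List Int) (he : List Int) : List (List Int) × List Int :=
  boundaries.foldl (fun st bound =>
    let c := pvCut st.2 bound
    (st.1 ++ [c.1], c.2)) ([], he)

-- stage 2 loop body: score one head timestamp ht against the prefix ending at bt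
def pvBUpd (heads : List Int) (neg_minus1 : Bool) (W : Int) (pre : List Int) (bt ht : Int)
    (st : PySem.Dict (List Int) (List Int) × Int) : PySem.Dict (List Int) (List Int) × Int :=
  if ht - bt < W ∧ (¬ (neg_minus1 = true) ∨ ¬ (PySem.Set.contains heads (ht - 1) = true)) then
    let key := (pre.filter
        (fun tb => decide (tb < ht) && (decide (ht - tb < W) || decide (W ≤ 0)))).map (fun tb => ht - tb)
    let p := st.1.setdefault key [0, 0]
    let p := p.modify key [0, 0] (fun entry =>
      let entry := if PySem.Set.contains heads ht then entry.set 0 (entry.getD 0 0 + 1) else entry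
      entry.set 1 (entry.getD 1 0 + 1))
    (p, st.2 + 1)
  else st

-- stage 2: 'for bt, run in zip(body_t, runs[1:]): prefix.append(bt); for ht in run: …'
def pvAgg (heads : List Int) (neg_minus1 : Bool) (W : Int) :
    List Int → List (Int × List Int) → PySem.Dict (List Int) (List Int) × Int →
    PySem.Dict (List Int) (List Int) × Int
  | _, [], st => st
  | pre, (bt, run) :: zs, st =>
    let pre' := pre ++ [bt]
    pvAgg heads neg_minus1 W pre' zs
      (run.foldl (fun st ht => pvBUpd heads neg_minus1 W pre' bt ht st) st)

def get_c_rule_scores_x_multi_alt (dataset : Int) (body_t : List Int) (head_ts : List Int) (head_exists_t : List Int) (show_ : Bool) (neg_minus1 : Bool) (x : Int) (WINDOW_SIZE : Int) : (List (List Int × List Int)) × Int :=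
  if body_t = [] then ([], 0)
  else
    let heads := PySem.Set.ofList head_ts
    let runs := (pvRunsFold (body_t ++ [10000000]) head_exists_t).1
    let r := pvAgg heads neg_minus1 WINDOW_SIZE [] (body_t.zip (runs.drop 1)) (PySem.Dict.mk [], 0)
    (r.1.items, r.2)

-- ===== PRECONDITION & SPEC =====
-- Pre_ excludes only body_t = [] with head_exists_t ≠ [], where the Python A raises IndexError.
def Pre_get_c_rule_scores_x_multi (dataset : Int) (body_t : List Int) (head_ts : List Int) (head_exists_t : List Int) (show_ : Bool) (neg_minus1 : Bool) (x : Int) (WINDOW_SIZE : Int) : Prop :=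
  body_t ≠ [] ∨ head_exists_t = []
instance (dataset : Int) (body_t : List Int) (head_ts : List Int) (head_exists_t : List Int) (show_ : Bool) (neg_minus1 : Bool) (x : Int) (WINDOW_SIZE : Int) : Decidable (Pre_get_c_rule_scores_x_multi dataset body_t head_ts head_exists_t show_ neg_minus1 x WINDOW_SIZE) := by unfold Pre_get_c_rule_scores_x_multi; infer_instance

def pvWitness_get_c_rule_scores_x_multi : Int × List Int × List Int × List Int × Bool × Bool × Int × Int :=
  (0, [1, 3], [2, 4], [2, 4, 5], false, false, 7, 3)


def Spec_get_c_rule_scores_x_multi (dataset : Int) (body_t : List Int) (head_ts : List Int) (head_exists_t : List Int) (show_ : Bool) (neg_minus1 : Bool) (x : Int) (WINDOW_SIZE : Int) (out : (List (List Int × List Int)) × Int) : Prop := out = get_c_rule_scores_x_multi_alt dataset body_t head_ts head_exists_t show_ neg_minus1 x WINDOW_SIZE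
instance (dataset : Int) (body_t : List Int) (head_ts : List Int) (head_exists_t : List Int) (show_ : Bool) (neg_minus1 : Bool) (x : Int) (WINDOW_SIZE : Int) (out : (List (List Int × List Int)) × Int) : Decidable (Spec_get_c_rule_scores_x_multi dataset body_t head_ts head_exists_t show_ neg_minus1 x WINDOW_SIZE out) := by unfold Spec_get_c_rule_scores_x_multi; infer_instance

-- ===== CLAIM (what is proved, stated in full; the proofs are below) =====
def Claim_equal_get_c_rule_scores_x_multi : Prop := ∀ (dataset : Int) (body_t : List Int) (head_ts : List Int) (head_exists_t : List Int) (show_ : Bool) (neg_minus1 : Bool) (x : Int) (WINDOW_SIZE : Int), Dom_get_c_rule_scores_x_multi dataset body_t head_ts head_exists_t show_ neg_minus1 x WINDOW_SIZE → Pre_get_c_rule_scores_x_multi dataset body_t head_ts head_exists_t show_ neg_minus1 x WINDOW_SIZE → Spec_get_c_rule_scores_x_multi dataset body_t head_ts head_exists_t show_ neg_minus1 x WINDOW_SIZE (get_c_rule_scores_x_multi dataset body_t head_ts head_exists_t show_ neg_minus1 x WINDOW_SIZE)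


-- ===== LEMMAS AND PROOFS =====

-- proof-only helpers
abbrev pvSt := PySem.Dict (List Int) (List Int) × Int

def pvBtNext (body_t : List Int) (ib : Nat) : Int :=
  if ib + 1 < body_t.length then body_t.getD (ib + 1) 0 else 10000000

-- A's per-head update, as a function on the (dict, counter) pair
def pvAUpd (hts body : List Int) (neg : Bool) (W btc : Int) (ib : Nat) (ht : Int)
    (st : pvSt) : pvSt :=
  if ht - btc < W ∧ (¬ (neg = true) ∨ ¬ (hts.contains (ht - 1) = true)) then
    let distances := get_distances_in_window ht (body.take (ib + 1)) W
    let p := if ¬ (st.1.contains distances = true)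
             then st.1.insert distances [0, 0] else st.1
    let p := if hts.contains ht
             then p.modify distances [0, 0] (fun v => v.set 0 (v.getD 0 0 + 1)) else p
    let p := p.modify distances [0, 0] (fun v => v.set 1 (v.getD 1 0 + 1))
    (p, st.2 + 1)
  else st

-- recursive form of B's segmentation
def pvRuns : List Int → List Int → List (List Int)
  | [], _ => []
  | bd :: bds, rest => (pvCut rest bd).1 :: pvRuns bds (pvCut rest bd).2

-- one-step unfolding lemmas for A's loops
theorem aOuter_unfold {he hts body : List Int} {neg : Bool} {W : Int} {ib ih : Nat}
    {pred : PySem.Dict (List Int) (List Int)} {cnt : Int} (hib : ib < body.length) :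
    pvAOuter he hts body neg W ib ih pred cnt =
      (if (pvAInner he hts body neg W (body.getD ib 0) (pvBtNext body ib) ib ih pred cnt).1 = he.length
       then ((pvAInner he hts body neg W (body.getD ib 0) (pvBtNext body ib) ib ih pred cnt).2.1,
             (pvAInner he hts body neg W (body.getD ib 0) (pvBtNext body ib) ib ih pred cnt).2.2)
       else pvAOuter he hts body neg W (ib + 1)
              (pvAInner he hts body neg W (body.getD ib 0) (pvBtNext body ib) ib ih pred cnt).1
              (pvAInner he hts body neg W (body.getD ib 0) (pvBtNext body ib) ib ih pred cnt).2.1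
              (pvAInner he hts body neg W (body.getD ib 0) (pvBtNext body ib) ib ih pred cnt).2.2) := by
  rw [pvAOuter, dif_pos hib]
  rfl

theorem aOuter_done {he hts body : List Int} {neg : Bool} {W : Int} {ib ih : Nat}
    {pred : PySem.Dict (List Int) (List Int)} {cnt : Int} (h : ¬ ib < body.length) :
    pvAOuter he hts body neg W ib ih pred cnt = (pred, cnt) := by
  rw [pvAOuter, dif_neg h]

theorem aInner_step {he hts body : List Int} {neg : Bool} {W btc btn : Int} {ib ih : Nat}
    {pred : PySem.Dict (List Int) (List Int)} {cnt : Int}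
    (h : ih < he.length ∧ he.getD ih 0 ≤ btn) :
    pvAInner he hts body neg W btc btn ib ih pred cnt =
      pvAInner he hts body neg W btc btn ib (ih + 1)
        (pvAUpd hts body neg W btc ib (he.getD ih 0) (pred, cnt)).1
        (pvAUpd hts body neg W btc ib (he.getD ih 0) (pred, cnt)).2 := by
  rw [pvAInner, dif_pos h]
  rfl

theorem aInner_stop {he hts body : List Int} {neg : Bool} {W btc btn : Int} {ib ih : Nat}
    {pred : PySem.Dict (List Int) (List Int)} {cnt : Int}
    (h : ¬ (ih < he.length ∧ he.getD ih 0 ≤ btn)) :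
    pvAInner he hts body neg W btc btn ib ih pred cnt = (ih, pred, cnt) := by
  rw [pvAInner, dif_neg h]

-- pvCut facts
theorem cut_snd (l : List Int) (bd : Int) : (pvCut l bd).2 = l.drop (pvCut l bd).1.length := by
  induction l with
  | nil => rfl
  | cons v vs ih =>
    by_cases h : bd < v
    · simp [pvCut, h]
    · simp [pvCut, h, ih]

theorem cut_len_le (l : List Int) (bd : Int) : (pvCut l bd).1.length ≤ l.length := by
  induction l with
  | nil => simp [pvCut]
  | cons v vs ih =>
    by_cases h : bd < v
    · simp [pvCut, h]
    · simp [pvCut, h]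
      omega

-- A's inner loop consumes exactly the run cut at bound btn and folds the update over it
theorem inner_eq (he hts body : List Int) (neg : Bool) (W btc btn : Int) (ib : Nat) :
    ∀ (k ih : Nat) (st : pvSt), he.length - ih ≤ k → ih ≤ he.length →
    pvAInner he hts body neg W btc btn ib ih st.1 st.2 =
      (ih + (pvCut (he.drop ih) btn).1.length,
       (pvCut (he.drop ih) btn).1.foldl (fun s ht => pvAUpd hts body neg W btc ib ht s) st) := by
  intro k
  induction k with
  | zero =>
    intro ih st hk hle
    have hnil : he.drop ih = ([] : List Int) := List.drop_eq_nil_of_le (by omega)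
    rw [aInner_stop (by omega : ¬ (ih < he.length ∧ he.getD ih 0 ≤ btn)), hnil]
    simp [pvCut]
  | succ k IH =>
    intro ih st hk hle
    by_cases hH : ih < he.length
    · have hdrop : he.drop ih = he.getD ih 0 :: he.drop (ih + 1) := by
        rw [List.drop_eq_getElem_cons hH]
        congr 1
        exact (List.getD_eq_getElem he 0 hH).symm
      by_cases hc : he.getD ih 0 ≤ btn
      · have hcut : pvCut (he.drop ih) btn =
            (he.getD ih 0 :: (pvCut (he.drop (ih + 1)) btn).1, (pvCut (he.drop (ih + 1)) btn).2) := by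
          rw [hdrop]
          simp only [pvCut]
          rw [if_neg (not_lt.mpr hc)]
        rw [aInner_step ⟨hH, hc⟩,
            IH (ih + 1) (pvAUpd hts body neg W btc ib (he.getD ih 0) st) (by omega) (by omega),
            hcut]
        simp only [Prod.mk.injEq, List.length_cons, List.foldl_cons]
        constructor
        · omega
        · trivial
      · rw [aInner_stop (fun hx => hc hx.2)]
        have hcut : pvCut (he.drop ih) btn = ([], he.drop ih) := by
          rw [hdrop]
          simp only [pvCut]
          rw [if_pos (lt_of_not_ge hc)]
        rw [hcut]
        simp
    · have hnil : he.drop ih = ([] : List Int) := List.drop_eq_nil_of_le (by omega)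
      rw [aInner_stop (by omega : ¬ (ih < he.length ∧ he.getD ih 0 ≤ btn)), hnil]
      simp [pvCut]

-- A's skip loop is the length of the first cut run
theorem skip_eq (he : List Int) (b0 : Int) :
    ∀ (k ih : Nat), he.length - ih ≤ k → ih ≤ he.length →
    pvASkip he b0 ih = ih + (pvCut (he.drop ih) b0).1.length := by
  intro k
  induction k with
  | zero =>
    intro ih hk hle
    have hnil : he.drop ih = ([] : List Int) := List.drop_eq_nil_of_le (by omega)
    rw [pvASkip, dif_neg (by omega : ¬ (ih < he.length ∧ he.getD ih 0 ≤ b0)), hnil]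
    simp [pvCut]
  | succ k IH =>
    intro ih hk hle
    by_cases hH : ih < he.length
    · have hdrop : he.drop ih = he.getD ih 0 :: he.drop (ih + 1) := by
        rw [List.drop_eq_getElem_cons hH]
        congr 1
        exact (List.getD_eq_getElem he 0 hH).symm
      by_cases hc : he.getD ih 0 ≤ b0
      · have hcut : pvCut (he.drop ih) b0 =
            (he.getD ih 0 :: (pvCut (he.drop (ih + 1)) b0).1, (pvCut (he.drop (ih + 1)) b0).2) := by
          rw [hdrop]
          simp only [pvCut]
          rw [if_neg (not_lt.mpr hc)]
        rw [pvASkip, dif_pos ⟨hH, hc⟩, IH (ih + 1) (by omega) (by omega), hcut]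
        simp only [List.length_cons]
        omega
      · have hcut : pvCut (he.drop ih) b0 = ([], he.drop ih) := by
          rw [hdrop]
          simp only [pvCut]
          rw [if_pos (lt_of_not_ge hc)]
        rw [pvASkip, dif_neg (fun hx => hc hx.2), hcut]
        simp
    · have hnil : he.drop ih = ([] : List Int) := List.drop_eq_nil_of_le (by omega)
      rw [pvASkip, dif_neg (by omega : ¬ (ih < he.length ∧ he.getD ih 0 ≤ b0)), hnil]
      simp [pvCut]

-- B's foldl segmentation equals the recursive form
theorem runsFold_acc (bds : List Int) : ∀ (acc : List (List Int)) (rest : List Int),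
    (bds.foldl (fun st bound =>
        let c := pvCut st.2 bound
        (st.1 ++ [c.1], c.2)) (acc, rest)).1 = acc ++ pvRuns bds rest := by
  induction bds with
  | nil => intro acc rest; simp [pvRuns]
  | cons bd bds ih =>
    intro acc rest
    simp only [List.foldl_cons, pvRuns]
    rw [ih]
    simp

-- aggregating all-empty runs changes nothing
theorem agg_empty (heads : List Int) (neg : Bool) (W : Int) :
    ∀ (xs bds pre : List Int) (st : pvSt),
    pvAgg heads neg W pre (xs.zip (pvRuns bds [])) st = st := by
  intro xs
  induction xs with
  | nil => intro bds pre st; simp [pvAgg]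
  | cons a xs ih =>
    intro bds pre st
    cases bds with
    | nil => simp [pvRuns, pvAgg]
    | cons bd bds =>
      simp only [pvRuns, pvCut, List.zip_cons_cons, pvAgg, List.foldl_nil]
      exact ih bds (pre ++ [a]) st

-- membership through set(head_ts)
theorem set_contains_ofList (xs : List Int) (y : Int) :
    PySem.Set.contains (PySem.Set.ofList xs) y = xs.contains y := by
  by_cases h : y ∈ xs <;>
    simp [PySem.Set.contains, List.contains_iff_mem, PySem.Set.mem_ofList, h]

-- A's helper loop equals B's filter/map comprehension
theorem dist_eq (t : Int) (pre : List Int) (W : Int) :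
    get_distances_in_window t pre W
      = (pre.filter (fun tb => decide (tb < t) && (decide (t - tb < W) || decide (W ≤ 0)))).map
          (fun tb => t - tb) := by
  unfold get_distances_in_window
  rw [show (fun (ds : List Int) (tb : Int) =>
        if t > tb then if t - tb < W ∨ W ≤ 0 then ds ++ [t - tb] else ds else ds)
      = (fun ds tb => if (decide (tb < t) && (decide (t - tb < W) || decide (W ≤ 0))) = true
                      then ds ++ [t - tb] else ds) from by
        funext ds tb
        by_cases h1 : tb < t <;> by_cases h2 : t - tb < W <;> by_cases h3 : W ≤ 0 <;>
          simp [h1, h2, h3]]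
  rw [PySem.List.foldl_append_if]
  simp

-- the per-example state updates agree
theorem upd_eq (hts body : List Int) (neg : Bool) (W : Int) (ib : Nat) (ht : Int)
    (st : pvSt) :
    pvAUpd hts body neg W (body.getD ib 0) ib ht st
      = pvBUpd (PySem.Set.ofList hts) neg W (body.take (ib + 1)) (body.getD ib 0) ht st := by
  unfold pvAUpd pvBUpd
  rw [set_contains_ofList, set_contains_ofList, dist_eq]
  by_cases hcond : ht - body.getD ib 0 < W ∧ (¬ (neg = true) ∨ ¬ (hts.contains (ht - 1) = true))
  · rw [if_pos hcond, if_pos hcond]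
    generalize ((body.take (ib + 1)).filter
        (fun tb => decide (tb < ht) && (decide (ht - tb < W) || decide (W ≤ 0)))).map
          (fun tb => ht - tb) = k
    by_cases hd : st.1.contains k = true <;> by_cases hm : ht ∈ hts
    · simp [hd, hm, PySem.Dict.setdefault_of_contains, PySem.Dict.modify,
            PySem.Dict.getD_insert_self, PySem.Dict.insert_insert_self]
    · simp [hd, hm, PySem.Dict.setdefault_of_contains, PySem.Dict.modify,
            PySem.Dict.getD_insert_self, PySem.Dict.insert_insert_self]
    · have hd' : st.1.contains k = false := by simpa using hd
      simp [hd', hm, PySem.Dict.setdefault_of_not_contains, PySem.Dict.modify,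
            PySem.Dict.getD_insert_self, PySem.Dict.insert_insert_self]
    · have hd' : st.1.contains k = false := by simpa using hd
      simp [hd', hm, PySem.Dict.setdefault_of_not_contains, PySem.Dict.modify,
            PySem.Dict.getD_insert_self, PySem.Dict.insert_insert_self]
  · rw [if_neg hcond, if_neg hcond]

theorem fold_upd_eq (hts body : List Int) (neg : Bool) (W : Int) (ib : Nat)
    (run : List Int) (st : pvSt) :
    run.foldl (fun s ht =>
        pvBUpd (PySem.Set.ofList hts) neg W (body.take (ib + 1)) (body.getD ib 0) ht s) st
      = run.foldl (fun s ht => pvAUpd hts body neg W (body.getD ib 0) ib ht s) st := by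
  have h : (fun (s : pvSt) ht =>
        pvBUpd (PySem.Set.ofList hts) neg W (body.take (ib + 1)) (body.getD ib 0) ht s)
      = (fun s ht => pvAUpd hts body neg W (body.getD ib 0) ib ht s) := by
    funext s ht
    exact (upd_eq hts body neg W ib ht s).symm
  rw [h]

-- main merge: A's fused loops equal B's segment-then-aggregate pass
theorem pv_main (he hts body : List Int) (neg : Bool) (W : Int) :
    ∀ (N ib ih : Nat) (st : pvSt),
      body.length - ib ≤ N → ib < body.length → ih ≤ he.length →
      pvAOuter he hts body neg W ib ih st.1 st.2
        = pvAgg (PySem.Set.ofList hts) neg W (body.take ib)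
            ((body.drop ib).zip (pvRuns (body.drop (ib + 1) ++ [10000000]) (he.drop ih))) st := by
  intro N
  induction N with
  | zero =>
    intro ib ih st hN hib hih
    exact absurd hib (by omega)
  | succ N IH =>
    intro ib ih st hN hib hih
    have hdropb : body.drop ib = body.getD ib 0 :: body.drop (ib + 1) := by
      rw [List.drop_eq_getElem_cons hib]
      congr 1
      exact (List.getD_eq_getElem body 0 hib).symm
    have htake : body.take ib ++ [body.getD ib 0] = body.take (ib + 1) := by
      rw [List.getD_eq_getElem body 0 hib, List.take_add_one, List.getElem?_eq_getElem hib]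
      rfl
    have hrunlen : (pvCut (he.drop ih) (pvBtNext body ib)).1.length ≤ he.length - ih := by
      have := cut_len_le (he.drop ih) (pvBtNext body ib)
      simpa [List.length_drop] using this
    have hrest : (pvCut (he.drop ih) (pvBtNext body ib)).2
        = he.drop (ih + (pvCut (he.drop ih) (pvBtNext body ib)).1.length) := by
      rw [cut_snd, List.drop_drop]
      try rw [Nat.add_comm]
    have hinner := inner_eq he hts body neg W (body.getD ib 0) (pvBtNext body ib) ib
        (he.length - ih) ih st le_rfl hih
    by_cases hlt : ib + 1 < body.length
    · have hbounds : body.drop (ib + 1) ++ [(10000000 : Int)]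
          = pvBtNext body ib :: (body.drop (ib + 2) ++ [10000000]) := by
        have : body.drop (ib + 1) = body.getD (ib + 1) 0 :: body.drop (ib + 2) := by
          rw [List.drop_eq_getElem_cons hlt]
          congr 1
          exact (List.getD_eq_getElem body 0 hlt).symm
        have hbt : pvBtNext body ib = body.getD (ib + 1) 0 := by
          rw [pvBtNext, if_pos hlt]
        rw [this, hbt]
        rfl
      rw [hbounds, hdropb]
      simp only [pvRuns, List.zip_cons_cons, pvAgg, htake, fold_upd_eq]
      rw [aOuter_unfold hib, hinner]
      by_cases hdone : ih + (pvCut (he.drop ih) (pvBtNext body ib)).1.length = he.length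
      · rw [if_pos hdone]
        rw [hrest, hdone, List.drop_length]
        rw [agg_empty]
      · rw [if_neg hdone]
        rw [IH (ib + 1) (ih + (pvCut (he.drop ih) (pvBtNext body ib)).1.length) _ (by omega) hlt (by omega)]
        rw [hrest]
    · have hdropb1 : body.drop (ib + 1) = ([] : List Int) :=
        List.drop_eq_nil_of_le (by omega)
      have hbtn : pvBtNext body ib = 10000000 := by
        simp [pvBtNext, hlt]
      rw [hdropb, hdropb1]
      simp only [List.nil_append, pvRuns, List.zip_cons_cons, List.zip_nil_left, pvAgg,
        htake, fold_upd_eq, List.foldl_nil, hbtn]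
      rw [aOuter_unfold hib, hinner, hbtn]
      by_cases hdone : ih + (pvCut (he.drop ih) (10000000 : Int)).1.length = he.length
      · rw [if_pos hdone]
      · rw [if_neg hdone, aOuter_done (by omega : ¬ ib + 1 < body.length)]


-- ===== VERDICT (by name: the statement is the Claim_ definition above) =====
theorem get_c_rule_scores_x_multi_spec : Claim_equal_get_c_rule_scores_x_multi := by
  intro dataset body hts he show_ neg x W _ hpre
  unfold Spec_get_c_rule_scores_x_multi
  by_cases hb : body = []
  · have hhe : he = [] := by
      rcases hpre with h | h
      · exact absurd hb h
      · exact h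
    subst hb; subst hhe
    simp only [get_c_rule_scores_x_multi, get_c_rule_scores_x_multi_alt]
    rw [pvASkip, dif_neg (by simp), aOuter_done (by simp)]
    simp
  · obtain ⟨b0, tl, rfl⟩ := List.exists_cons_of_ne_nil hb
    have hskip : pvASkip he ((b0 :: tl).getD 0 0) 0 = (pvCut he b0).1.length := by
      have := skip_eq he b0 he.length 0 (by omega) (Nat.zero_le _)
      simpa using this
    have hdrop0 : he.drop (pvCut he b0).1.length = (pvCut he b0).2 := (cut_snd he b0).symm
    have hle : (pvCut he b0).1.length ≤ he.length := cut_len_le he b0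
    have hmain := pv_main he hts (b0 :: tl) neg W (tl.length + 1) 0
        ((pvCut he b0).1.length) (PySem.Dict.mk [], 0) (by simp) (by simp) hle
    simp only [get_c_rule_scores_x_multi, get_c_rule_scores_x_multi_alt, if_neg hb]
    rw [hskip, hmain, hdrop0]
    have hruns : (pvRunsFold ((b0 :: tl) ++ [10000000]) he).1
        = (pvCut he b0).1 :: pvRuns (tl ++ [10000000]) (pvCut he b0).2 := by
      unfold pvRunsFold
      rw [show (b0 :: tl) ++ [(10000000 : Int)] = b0 :: (tl ++ [10000000]) from rfl]
      rw [show ∀ (l : List Int) (r : List Int),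
            (b0 :: l).foldl (fun (st : List (List Int) × List Int) bound =>
              let c := pvCut st.2 bound
              (st.1 ++ [c.1], c.2)) ([], r)
            = l.foldl (fun (st : List (List Int) × List Int) bound =>
              let c := pvCut st.2 bound
              (st.1 ++ [c.1], c.2)) ([(pvCut r b0).1], (pvCut r b0).2) from fun l r => rfl]
      rw [runsFold_acc]
      simp
    rw [hruns]
    simp [pvRuns]
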